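-- pv_equiv track=rewrite | github.com/xcaim04/learn-python | exercise_opp/10.py | _student_attendance
-- ===== SOURCE A (Python) =====
-- def _student_attendance(attendance) -> int:
--     res = 3
--     for mes, attendance in attendance.items():
--         if attendance < 4:
--             res = min(res, 1)
--         elif 4 <= attendance < 8:
--             res = min(res, 2)
--         else: res = min(res, 3)
--     return res
-- ===== SOURCE B (Python) =====
-- def _student_attendance(attendance) -> int:
--     if not attendance:
--         return 3
--     m = min(attendance.values())
--     return 1 if m < 4 else (2 if m < 8 else 3)
-- ===== Notes on version B (the rewrite author's own statement) =====
-- stated objective: simpler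
-- what changed: B reduces first (min of the values) and classifies once, instead of A's per-element classify-then-min fold; equivalence rests on the classifier being monotone.
import Mathlib
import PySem

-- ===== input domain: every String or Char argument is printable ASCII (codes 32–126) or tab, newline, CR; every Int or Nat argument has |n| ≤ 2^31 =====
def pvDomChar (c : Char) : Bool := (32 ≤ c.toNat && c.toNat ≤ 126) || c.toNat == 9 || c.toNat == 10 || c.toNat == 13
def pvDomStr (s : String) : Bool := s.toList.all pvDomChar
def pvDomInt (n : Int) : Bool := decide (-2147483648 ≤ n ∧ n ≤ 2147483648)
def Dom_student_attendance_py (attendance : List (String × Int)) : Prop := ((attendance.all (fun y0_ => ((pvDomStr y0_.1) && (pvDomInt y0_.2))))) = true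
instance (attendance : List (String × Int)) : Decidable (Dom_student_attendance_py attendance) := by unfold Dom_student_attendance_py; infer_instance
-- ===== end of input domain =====

-- B reduces first (min of the values) then classifies once, instead of A's per-element classify-then-min fold (simpler decomposition; same cost).


-- ===== PORT A =====
def student_attendance_py (attendance : List (String × Int)) : Int :=
  attendance.foldl (fun res p =>
    if p.2 < 4 then min res 1
    else if 4 ≤ p.2 ∧ p.2 < 8 then min res 2
    else min res 3) 3

-- ===== PORT B =====
-- 1 if m < 4 else (2 if m < 8 else 3)
def pvClassify (m : Int) : Int := if m < 4 then 1 else if m < 8 then 2 else 3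

def student_attendance_py_alt (attendance : List (String × Int)) : Int :=
  match PySem.List.min? (attendance.map Prod.snd) (fun x => x) with
  | none => 3
  | some m => pvClassify m

-- ===== PRECONDITION & SPEC =====
def Spec_student_attendance_py (attendance : List (String × Int)) (out : Int) : Prop := out = student_attendance_py_alt attendance
instance (attendance : List (String × Int)) (out : Int) : Decidable (Spec_student_attendance_py attendance out) := by unfold Spec_student_attendance_py; infer_instance

-- ===== CLAIM (what is proved, stated in full; the proofs are below) =====
def Claim_equal_student_attendance_py : Prop := ∀ (attendance : List (String × Int)), Dom_student_attendance_py attendance → Spec_student_attendance_py attendance (student_attendance_py attendance)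

-- ===== LEMMAS AND PROOFS =====

-- ===== VERDICT (by name: the statement is the Claim_ definition above) =====
lemma pvClassify_min (a b : Int) : pvClassify (min a b) = min (pvClassify a) (pvClassify b) := by
  unfold pvClassify
  rcases le_total a b with h | h <;> simp [min_def] <;> split_ifs <;> omega

lemma pvLoop (vs : List Int) (a : Int) :
    vs.foldl (fun r v => min r (pvClassify v)) (pvClassify a) = pvClassify (vs.foldl min a) := by
  induction vs generalizing a with
  | nil => rfl
  | cons w t ih =>
    simp only [List.foldl_cons, ← pvClassify_min, ih]

lemma pvFoldSnd (l : List (String × Int)) (r : Int) :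
    l.foldl (fun res p => min res (pvClassify p.2)) r
      = (l.map Prod.snd).foldl (fun r v => min r (pvClassify v)) r := by
  induction l generalizing r with
  | nil => rfl
  | cons x t ih => simp [List.foldl_cons, ih]

lemma pvStep_eq :
    (fun (res : Int) (p : String × Int) =>
      if p.2 < 4 then min res 1
      else if 4 ≤ p.2 ∧ p.2 < 8 then min res 2
      else min res 3)
    = (fun (res : Int) (p : String × Int) => min res (pvClassify p.2)) := by
  funext res p
  unfold pvClassify
  split_ifs <;> first | rfl | omega

theorem student_attendance_py_spec : Claim_equal_student_attendance_py := by
  intro attendance _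
  unfold Spec_student_attendance_py student_attendance_py student_attendance_py_alt
  rw [pvStep_eq, pvFoldSnd]
  cases h : attendance.map Prod.snd with
  | nil => simp [PySem.List.min?]
  | cons v vs =>
    rw [PySem.List.min?_id_cons]
    simp only [List.foldl_cons]
    have hmin : min 3 (pvClassify v) = pvClassify v := by unfold pvClassify; split_ifs <;> decide
    rw [hmin, pvLoop]
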